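-- pv_equiv track=rewrite | github.com/QSAR-UBC/QT-CorGI | qtcorgi/qaoa3Colouring/find3ColourableGraphs/checkGraphs.py | get_max_edges
-- ===== SOURCE A (Python) =====
-- def get_max_edges(n):
--     """
--     Gets maximum number of edges for a graph with n nodes to still be three colorable
--
--     Args:
--         n (int): number of nodes
--
--     Returns:
--         max_edges (int): maximum number of edges for a n node 3-colourable graph
--     """
--     max_edges = 0
--     cols = [0, 0, 0]
--     for i in range(n):
--         col = cols[i % 3]
--         cols[i % 3] += 1
--         add = i - col
--         max_edges += add
--     return max_edges
-- ===== SOURCE B (Python) =====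
-- def get_max_edges(n):
--     """Closed form: the loop distributes n nodes into 3 near-equal colour classes;
--     the max edge count is the sum of pairwise products of the class sizes."""
--     if n <= 0:
--         return 0
--     q, r = divmod(n, 3)
--     a = q + (1 if r > 0 else 0)
--     b = q + (1 if r > 1 else 0)
--     c = q
--     return a * b + a * c + b * c
-- ===== Notes on version B (the rewrite author's own statement) =====
-- stated objective: faster
-- what changed: Replaced the O(n) loop that incrementally grows three colour classes with an O(1) closed form: divmod(n,3) gives the three near-equal class sizes and the answer is the sum of their pairwise products.
import Mathlib
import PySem

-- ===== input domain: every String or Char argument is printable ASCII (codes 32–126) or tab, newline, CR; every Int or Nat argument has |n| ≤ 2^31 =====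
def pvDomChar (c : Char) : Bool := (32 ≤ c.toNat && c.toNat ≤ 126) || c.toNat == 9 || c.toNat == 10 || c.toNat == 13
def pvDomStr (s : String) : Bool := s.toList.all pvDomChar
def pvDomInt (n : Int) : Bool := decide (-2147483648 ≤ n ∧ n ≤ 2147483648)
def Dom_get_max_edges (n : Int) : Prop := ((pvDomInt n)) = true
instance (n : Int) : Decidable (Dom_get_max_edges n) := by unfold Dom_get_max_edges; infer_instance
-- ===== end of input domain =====

-- B replaces A's O(n) counting loop with the O(1) closed form (pairwise products of the
-- three near-equal colour-class sizes); equivalence is proved for every Int input.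

-- ===== PORT A =====
-- loop body: col = cols[i % 3]; cols[i % 3] += 1; max_edges += i - col
-- the index i % 3 is always in [0, 3), so pyGetD/pySetD are exact here
def getMaxEdgesStep (st : Int × List Int) (i : Int) : Int × List Int :=
  let col := PySem.List.pyGetD st.2 (PySem.Int.mod i 3) 0
  let cols := PySem.List.pySetD st.2 (PySem.Int.mod i 3) (col + 1)
  (st.1 + (i - col), cols)

def get_max_edges (n : Int) : Int :=
  ((PySem.List.pyRange 0 n 1).foldl getMaxEdgesStep (0, [0, 0, 0])).1

-- ===== PORT B =====
def get_max_edges_alt (n : Int) : Int :=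
  if n ≤ 0 then 0
  else
    let q := PySem.Int.floordiv n 3
    let r := PySem.Int.mod n 3
    let a := q + (if r > 0 then 1 else 0)
    let b := q + (if r > 1 then 1 else 0)
    let c := q
    a * b + a * c + b * c

-- ===== PRECONDITION & SPEC =====
def Spec_get_max_edges (n : Int) (out : Int) : Prop := out = get_max_edges_alt n
instance (n : Int) (out : Int) : Decidable (Spec_get_max_edges n out) := by unfold Spec_get_max_edges; infer_instance

-- ===== CLAIM (what is proved, stated in full; the proofs are below) =====
def Claim_equal_get_max_edges : Prop := ∀ (n : Int), Dom_get_max_edges n → Spec_get_max_edges n (get_max_edges n)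

-- ===== LEMMAS AND PROOFS =====

-- class sizes after m loop iterations
def gmeC0 (m : Nat) : Int := ((m + 2) / 3 : Nat)
def gmeC1 (m : Nat) : Int := ((m + 1) / 3 : Nat)
def gmeC2 (m : Nat) : Int := ((m) / 3 : Nat)

lemma gme_loop (m : Nat) :
    (PySem.List.pyRange 0 (m : Int) 1).foldl getMaxEdgesStep (0, [0, 0, 0]) =
      (gmeC0 m * gmeC1 m + gmeC0 m * gmeC2 m + gmeC1 m * gmeC2 m,
       [gmeC0 m, gmeC1 m, gmeC2 m]) := by
  induction m with
  | zero => simp [gmeC0, gmeC1, gmeC2]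
  | succ m ih =>
      have hsplit : (PySem.List.pyRange 0 ((m + 1 : Nat) : Int) 1) =
          PySem.List.pyRange 0 (m : Int) 1 ++ [(m : Int)] := by
        push_cast
        exact PySem.List.pyRange_one_succ_right (by positivity)
      rw [hsplit, List.foldl_append, ih]
      simp only [List.foldl]
      obtain ⟨k, r, hr, hm⟩ : ∃ k r, r < 3 ∧ m = 3 * k + r :=
        ⟨m / 3, m % 3, Nat.mod_lt _ (by omega), by omega⟩
      subst hm
      have hmod : PySem.Int.mod ((3 * k + r : Nat) : Int) 3 = (r : Int) := by
        rw [PySem.Int.mod_eq_emod_of_pos (by norm_num)]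
        push_cast; omega
      interval_cases r <;>
        simp only [getMaxEdgesStep, hmod, Nat.cast_ofNat, Nat.cast_one, Nat.cast_zero,
          PySem.List.pyGetD, PySem.List.pySetD, PySem.List.pyGet?,
          PySem.List.pyIdx?, PySem.List.pySet?] <;>
        norm_num [gmeC0, gmeC1, gmeC2, Prod.ext_iff]
      · have d1 : (3*(k:Int)+2)/3 = k := by omega
        have d2 : (3*(k:Int)+1)/3 = k := by omega
        have d3 : (3*(k:Int)+1+2)/3 = k+1 := by omega
        have d4 : (3*(k:Int)+1+1)/3 = k := by omega
        rw [d1, d2, d3, d4]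
        refine ⟨by ring, by ring, rfl, rfl⟩
      · have d1 : (3*(k:Int)+1+2)/3 = k+1 := by omega
        have d2 : (3*(k:Int)+1+1)/3 = k := by omega
        have d3 : (3*(k:Int)+1)/3 = k := by omega
        have d4 : (3*(k:Int)+1+1+2)/3 = k+1 := by omega
        have d5 : (3*(k:Int)+1+1+1)/3 = k+1 := by omega
        rw [d1, d2, d3, d4, d5]
        refine ⟨by ring, rfl, by ring, rfl⟩
      · have d1 : (3*(k:Int)+2+2)/3 = k+1 := by omega
        have d2 : (3*(k:Int)+2+1)/3 = k+1 := by omega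
        have d3 : (3*(k:Int)+2)/3 = k := by omega
        have d4 : (3*(k:Int)+2+1+2)/3 = k+1 := by omega
        have d5 : (3*(k:Int)+2+1+1)/3 = k+1 := by omega
        rw [d1, d2, d3, d4, d5]
        norm_num [show ((2:Int)).toNat = 2 from rfl, List.set]
        ring

-- ===== VERDICT (by name: the statement is the Claim_ definition above) =====
theorem get_max_edges_spec : Claim_equal_get_max_edges := by
  intro n _
  unfold Spec_get_max_edges get_max_edges get_max_edges_alt
  by_cases hn : n ≤ 0
  · rw [PySem.List.pyRange_one_eq_nil hn]
    simp [hn]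
  · have hm : n = ((n.toNat : Nat) : Int) := by omega
    rw [hm, gme_loop]
    simp only [if_neg (by omega : ¬ ((n.toNat : Nat) : Int) ≤ 0)]
    set m := n.toNat with hmdef
    have hq : PySem.Int.floordiv ((m : Nat) : Int) 3 = ((m / 3 : Nat) : Int) := by
      exact_mod_cast PySem.Int.floordiv_natCast m 3
    have hr : PySem.Int.mod ((m : Nat) : Int) 3 = ((m % 3 : Nat) : Int) := by
      exact_mod_cast PySem.Int.mod_natCast m 3
    rw [hq, hr]
    have ha : ((m / 3 : Nat) : Int) + (if ((m % 3 : Nat) : Int) > 0 then 1 else 0) = gmeC0 m := by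
      unfold gmeC0; split_ifs <;> push_cast <;> omega
    have hb : ((m / 3 : Nat) : Int) + (if ((m % 3 : Nat) : Int) > 1 then 1 else 0) = gmeC1 m := by
      unfold gmeC1; split_ifs <;> push_cast <;> omega
    rw [ha, hb]
    unfold gmeC2
    ring
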